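-- pv_equiv track=rewrite | github.com/sof-ter/s.terpylo_fb06_srom | labs/lab_4.py | find_matrix_in_basis
-- ===== SOURCE A (Python) =====
-- def find_matrix_in_basis(dimensionality):
--     p = 2 * dimensionality + 1
--     matrix = []
--     for i in range(dimensionality):
--         matrix.append([])
--         for j in range(dimensionality):
--             l_i, l_j = 2 ** i, 2 ** j
--             if (l_i + l_j) % p == 1 or (l_i - l_j) % p == 1 or (-l_i - l_j) % p == 1 or (-l_i + l_j) % p == 1:
--                 matrix[i].append(1)
--             else:
--                 matrix[i].append(0)
--     return matrix
-- ===== SOURCE B (Python) =====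
-- def find_matrix_in_basis(dimensionality):
--     n = dimensionality
--     if n <= 0:
--         return []
--     p = 2 * n + 1
--     # powers of 2 mod p, by iterated doubling
--     pw = []
--     r = 1
--     for _ in range(n):
--         pw.append(r)
--         r = 2 * r % p
--     # inverted index: residue -> list of columns holding it
--     cols = {}
--     for j, v in enumerate(pw):
--         cols.setdefault(v, []).append(j)
--     # scatter: each row starts all-zero; only the (at most four) hit
--     # residues are looked up and their columns set to 1
--     matrix = []
--     for pi in pw:
--         row = [0] * n
--         for t in ((1 - pi) % p, (pi - 1) % p, (-1 - pi) % p, (pi + 1) % p):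
--             for j in cols.get(t, ()):
--                 row[j] = 1
--         matrix.append(row)
--     return matrix
-- ===== Notes on version B (the rewrite author's own statement) =====
-- stated objective: faster
-- what changed: B inverts the problem: instead of testing every cell with four big-int mod computations, it precomputes the powers of 2 mod p by iterated doubling, builds an inverted index residue->columns once, and constructs each row as an all-zero list scattering 1s only at the columns the row's at-most-four target residues index to, so no per-cell test is performed at all.
import Mathlib
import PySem

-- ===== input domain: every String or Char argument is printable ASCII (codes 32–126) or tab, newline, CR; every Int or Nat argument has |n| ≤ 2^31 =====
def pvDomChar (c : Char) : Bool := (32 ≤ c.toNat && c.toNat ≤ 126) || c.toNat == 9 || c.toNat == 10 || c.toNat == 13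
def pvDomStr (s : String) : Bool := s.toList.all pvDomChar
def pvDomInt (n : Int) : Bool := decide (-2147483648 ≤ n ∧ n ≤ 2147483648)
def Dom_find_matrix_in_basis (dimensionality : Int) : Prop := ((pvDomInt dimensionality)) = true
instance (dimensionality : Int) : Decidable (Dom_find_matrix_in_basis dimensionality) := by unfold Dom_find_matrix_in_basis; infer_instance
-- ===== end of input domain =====

-- B drops A's per-cell big-int test: it precomputes the powers of 2 mod p once, builds an
-- inverted index residue -> columns, and scatters 1s into all-zero rows (objective: faster).

-- ===== PORT A =====
-- 2 ** i with i drawn from range(dimensionality): i ≥ 0 there, so the Int exponent is i.toNat (exact)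
def find_matrix_in_basis (dimensionality : Int) : List (List Int) :=
  let p := 2 * dimensionality + 1
  (PySem.List.pyRange 0 dimensionality 1).foldl (fun matrix i =>
    matrix ++ [(PySem.List.pyRange 0 dimensionality 1).foldl (fun row j =>
      let l_i := (2:Int) ^ i.toNat
      let l_j := (2:Int) ^ j.toNat
      if PySem.Int.mod (l_i + l_j) p = 1 ∨ PySem.Int.mod (l_i - l_j) p = 1 ∨
          PySem.Int.mod (-l_i - l_j) p = 1 ∨ PySem.Int.mod (-l_i + l_j) p = 1
        then row ++ [1] else row ++ [0]) []]) []

-- ===== PORT B =====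
-- row[j] = 1 is ported as List.set j.toNat: every j stored in cols comes from
-- enumerate(pw), so 0 ≤ j < len(row) and the assignment is exact there
def find_matrix_in_basis_alt (dimensionality : Int) : List (List Int) :=
  if dimensionality ≤ 0 then []
  else
    let p := 2 * dimensionality + 1
    let pw := ((PySem.List.pyRange 0 dimensionality 1).foldl
        (fun (st : List Int × Int) _ => (st.1 ++ [st.2], PySem.Int.mod (2 * st.2) p)) ([], 1)).1
    let cols := (PySem.List.enumerate pw 0).foldl
        (fun (d : PySem.Dict Int (List Int)) jv => d.modify jv.2 [] (· ++ [jv.1]))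
        PySem.Dict.empty
    pw.foldl (fun matrix pi =>
      matrix ++ [[PySem.Int.mod (1 - pi) p, PySem.Int.mod (pi - 1) p,
                  PySem.Int.mod (-1 - pi) p, PySem.Int.mod (pi + 1) p].foldl
        (fun row t => (cols.getD t []).foldl
          (fun row j => row.set j.toNat 1) row)
        (List.replicate dimensionality.toNat (0:Int))]) []

-- ===== PRECONDITION & SPEC =====
def Spec_find_matrix_in_basis (dimensionality : Int) (out : List (List Int)) : Prop := out = find_matrix_in_basis_alt dimensionality
instance (dimensionality : Int) (out : List (List Int)) : Decidable (Spec_find_matrix_in_basis dimensionality out) := by unfold Spec_find_matrix_in_basis; infer_instance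

-- ===== CLAIM (what is proved, stated in full; the proofs are below) =====
def Claim_equal_find_matrix_in_basis : Prop := ∀ (dimensionality : Int), Dom_find_matrix_in_basis dimensionality → Spec_find_matrix_in_basis dimensionality (find_matrix_in_basis dimensionality)

-- ===== LEMMAS AND PROOFS =====

-- shifting a divisibility test by a known multiple of p
theorem fm_dvd_shift (p s t : Int) (h : p ∣ (s - t)) : (p ∣ s ↔ p ∣ t) := by
  constructor <;> intro hh
  · have e : s - (s - t) = t := by ring
    exact e ▸ dvd_sub hh h
  · have e : (s - t) + t = s := by ring
    exact e ▸ dvd_add h hh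

-- X % p = 1 pins the reduced y to the residue of E, whenever X - 1 ≡ y - E (mod p)
theorem fm_hit (p X E y : Int) (hp : 1 < p) (h0 : 0 ≤ y) (h1 : y < p)
    (h : (p ∣ (X - 1)) ↔ (p ∣ (y - E))) : (X % p = 1 ↔ y = E % p) := by
  have h1p : (1:Int) % p = 1 := Int.emod_eq_of_lt (by omega) (by omega)
  have hy : y % p = y := Int.emod_eq_of_lt h0 h1
  constructor
  · intro hx
    have hd : p ∣ X - 1 := by
      rw [← PySem.Int.emod_eq_zero_iff_dvd, ← Int.emod_eq_emod_iff_emod_sub_eq_zero, h1p]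
      exact hx
    have hd2 : (y - E) % p = 0 := (PySem.Int.emod_eq_zero_iff_dvd _ _).2 (h.1 hd)
    have h3 := Int.emod_eq_emod_iff_emod_sub_eq_zero.2 hd2
    rw [hy] at h3
    exact h3
  · intro hy2
    have hdE : p ∣ (y - E) := by
      rw [hy2, show E % p - E = -(E - E % p) by ring]
      exact dvd_neg.2 Int.dvd_self_sub_emod
    have hd : (X - 1) % p = 0 := (PySem.Int.emod_eq_zero_iff_dvd _ _).2 (h.2 hdE)
    rw [← h1p]
    exact Int.emod_eq_emod_iff_emod_sub_eq_zero.2 hd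

-- the per-cell equivalence: A's four big-int tests say exactly that the reduced
-- power of two b % p is one of B's four target residues
theorem fm_cell_eq (p a b : Int) (hp : 1 < p) :
    ((a + b) % p = 1 ∨ (a - b) % p = 1 ∨ (-a - b) % p = 1 ∨ (-a + b) % p = 1)
      ↔ (b % p) ∈ [(1 - a % p) % p, (a % p - 1) % p, (-1 - a % p) % p, (a % p + 1) % p] := by
  have h0 : 0 ≤ b % p := Int.emod_nonneg b (by omega)
  have h1 : b % p < p := Int.emod_lt_of_pos b (by omega)
  have ha : p ∣ (a - a % p) := Int.dvd_self_sub_emod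
  have hb : p ∣ (b - b % p) := Int.dvd_self_sub_emod
  have hc1 : ((a + b) % p = 1 ↔ b % p = (1 - a % p) % p) :=
    fm_hit p (a + b) (1 - a % p) (b % p) hp h0 h1
      (fm_dvd_shift p _ _
        ((show (a + b - 1) - (b % p - (1 - a % p)) = (a - a % p) + (b - b % p) by ring) ▸
          dvd_add ha hb))
  have hc2 : ((a - b) % p = 1 ↔ b % p = (a % p - 1) % p) :=
    fm_hit p (a - b) (a % p - 1) (b % p) hp h0 h1
      ((fm_dvd_shift p _ (a % p - 1 - b % p)
          ((show (a - b - 1) - (a % p - 1 - b % p) = (a - a % p) - (b - b % p) by ring) ▸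
            dvd_sub ha hb)).trans
        (by rw [show a % p - 1 - b % p = -(b % p - (a % p - 1)) by ring]; exact Int.dvd_neg))
  have hc3 : ((-a - b) % p = 1 ↔ b % p = (-1 - a % p) % p) :=
    fm_hit p (-a - b) (-1 - a % p) (b % p) hp h0 h1
      ((fm_dvd_shift p _ (-1 - a % p - b % p)
          ((show (-a - b - 1) - (-1 - a % p - b % p) = -(a - a % p) + (b % p - b) by ring) ▸
            dvd_add (dvd_neg.2 ha)
              ((show -(b - b % p) = b % p - b by ring) ▸ dvd_neg.2 hb))).trans
        (by rw [show -1 - a % p - b % p = -(b % p - (-1 - a % p)) by ring]; exact Int.dvd_neg))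
  have hc4 : ((-a + b) % p = 1 ↔ b % p = (a % p + 1) % p) :=
    fm_hit p (-a + b) (a % p + 1) (b % p) hp h0 h1
      (fm_dvd_shift p _ _
        ((show (-a + b - 1) - (b % p - (a % p + 1)) = -(a - a % p) + (b - b % p) by ring) ▸
          dvd_add (dvd_neg.2 ha) hb))
  simp only [List.mem_cons, List.not_mem_nil, or_false]
  rw [hc1, hc2, hc3, hc4]

-- the doubling loop produces exactly the reduced powers of two
theorem fm_pw_fold (p : Int) (hp : 0 < p) (l : List Int) :
    ∀ (k : Nat) (acc : List Int),
      (l.foldl (fun (st : List Int × Int) _ => (st.1 ++ [st.2], PySem.Int.mod (2 * st.2) p))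
          (acc, PySem.Int.mod ((2:Int) ^ k) p))
        = (acc ++ (List.range l.length).map (fun t => PySem.Int.mod ((2:Int) ^ (k + t)) p),
           PySem.Int.mod ((2:Int) ^ (k + l.length)) p) := by
  induction l with
  | nil => intro k acc; simp
  | cons x l ih =>
    intro k acc
    have hstep : PySem.Int.mod (2 * PySem.Int.mod ((2:Int) ^ k) p) p
        = PySem.Int.mod ((2:Int) ^ (k + 1)) p := by
      simp only [PySem.Int.mod_eq_emod_of_pos hp]
      rw [pow_succ, mul_comm ((2:Int)^k) 2, Int.mul_emod, Int.emod_emod_of_dvd _ dvd_rfl,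
        ← Int.mul_emod]
    simp only [List.foldl_cons, hstep]
    rw [ih (k + 1) (acc ++ [PySem.Int.mod ((2:Int) ^ k) p])]
    simp only [Prod.mk.injEq, List.length_cons]
    have he : ∀ t : Nat, k + 1 + t = k + (t + 1) := fun t => by omega
    refine ⟨?_, by rw [he]⟩
    rw [List.append_assoc, List.singleton_append, List.range_succ_eq_map, List.map_cons,
      List.map_map]
    simp only [he]
    simp [Function.comp]

theorem fm_ite_append (c : Prop) [inst : Decidable c] (row : List Int) :
    (if c then row ++ [(1:Int)] else row ++ [0]) = row ++ [if c then 1 else 0] := by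
  split <;> rfl

-- the inverted index: cols.get(t, []) is exactly the (ordered) list of columns j with pw[j] = t
theorem fm_cols_getD (pw : List Int) (t : Int) :
    (((PySem.List.enumerate pw 0).foldl
        (fun (d : PySem.Dict Int (List Int)) jv => d.modify jv.2 [] (· ++ [jv.1]))
        PySem.Dict.empty).getD t [])
      = (((PySem.List.enumerate pw 0).filter (fun jv => jv.2 == t)).map (·.1)) := by
  have h : (PySem.List.enumerate pw 0).foldl
        (fun (d : PySem.Dict Int (List Int)) jv => d.modify jv.2 [] (· ++ [jv.1]))
        PySem.Dict.empty
      = ((PySem.List.enumerate pw 0).map (fun jv => (jv.2, jv.1))).foldl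
        (fun (d : PySem.Dict Int (List Int)) q => d.modify q.1 [] (· ++ [q.2]))
        PySem.Dict.empty := by
    rw [List.foldl_map]
  rw [h, PySem.Dict.getD_foldl_modify_append, PySem.Dict.getD_empty]
  simp [List.filter_map, Function.comp_def]

-- length is preserved through the scatter loops
theorem fm_scat_len (l : List Int) (r : List Int) :
    (l.foldl (fun row j => row.set j.toNat (1:Int)) r).length = r.length := by
  induction l generalizing r with
  | nil => rfl
  | cons j l ih => simp [List.foldl_cons, ih, List.length_set]

-- a scatter loop writes 1 exactly at the listed positions
theorem fm_scat_get (l : List Int) (r : List Int) (i : Nat) (hi : i < r.length) :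
    (l.foldl (fun row j => row.set j.toNat (1:Int)) r).getD i 0
      = if l.any (fun j => j.toNat == i) then 1 else r.getD i 0 := by
  induction l generalizing r with
  | nil => simp
  | cons j l ih =>
    simp only [List.foldl_cons, List.any_cons]
    rw [ih (r.set j.toNat 1) (by simpa using hi)]
    by_cases hj : j.toNat = i
    · by_cases hl : l.any (fun j => j.toNat == i)
      · simp [hj, hl]
      · simp only [hl, Bool.false_eq_true, if_false, hj, beq_self_eq_true, Bool.true_or,
          if_true]
        subst hj
        simp [List.getD, hi]
    · by_cases hl : l.any (fun j => j.toNat == i)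
      · simp [hl]
      · have : (j.toNat == i) = false := by simpa using hj
        simp only [this, hl, Bool.or_false, Bool.false_eq_true, if_false]
        simp [List.getD, List.getElem?_set_ne hj]

theorem fm_scat2_len (cols : PySem.Dict Int (List Int)) (ts : List Int) (r : List Int) :
    (ts.foldl (fun row t => (cols.getD t []).foldl
        (fun row j => row.set j.toNat (1:Int)) row) r).length = r.length := by
  induction ts generalizing r with
  | nil => rfl
  | cons t ts ih => simp [List.foldl_cons, ih, fm_scat_len]

theorem fm_scat2_get (cols : PySem.Dict Int (List Int)) (ts : List Int) (r : List Int)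
    (i : Nat) (hi : i < r.length) :
    (ts.foldl (fun row t => (cols.getD t []).foldl
        (fun row j => row.set j.toNat (1:Int)) row) r).getD i 0
      = if ts.any (fun t => (cols.getD t []).any (fun j => j.toNat == i)) then 1
        else r.getD i 0 := by
  induction ts generalizing r with
  | nil => simp
  | cons t ts ih =>
    simp only [List.foldl_cons, List.any_cons]
    rw [ih _ (by simpa [fm_scat_len] using hi), fm_scat_get _ _ _ hi]
    by_cases h1 : (cols.getD t []).any (fun j => j.toNat == i) <;>
      by_cases h2 : ts.any (fun t => (cols.getD t []).any (fun j => j.toNat == i)) <;>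
      simp [h1, h2]

theorem fm_main (d : Int) : find_matrix_in_basis d = find_matrix_in_basis_alt d := by
  by_cases hd : d ≤ 0
  · unfold find_matrix_in_basis find_matrix_in_basis_alt
    rw [PySem.List.pyRange_one_eq_nil hd, if_pos hd]
    rfl
  · unfold find_matrix_in_basis find_matrix_in_basis_alt
    rw [if_neg hd]
    dsimp only
    set p : Int := 2 * d + 1 with hpdef
    have hp : (1:Int) < p := by omega
    have h1 : (1:Int) = PySem.Int.mod ((2:Int) ^ 0) p := by
      rw [PySem.Int.mod_eq_emod_of_pos (by omega), pow_zero, Int.emod_eq_of_lt (by omega) (by omega)]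
    have hpw := fm_pw_fold p (by omega) (PySem.List.pyRange 0 d 1) 0 []
    rw [← h1] at hpw
    simp only [List.nil_append, Nat.zero_add] at hpw
    rw [hpw]
    dsimp only
    set n : Nat := (PySem.List.pyRange 0 d 1).length with hndef
    have hn : n = d.toNat := by
      rw [hndef, PySem.List.length_pyRange_one]
      omega
    set pwF : Nat → Int := fun t => PySem.Int.mod ((2:Int) ^ t) p with hpwF
    set pw : List Int := (List.range n).map pwF with hpwdef
    set cols : PySem.Dict Int (List Int) := (PySem.List.enumerate pw 0).foldl
        (fun (d : PySem.Dict Int (List Int)) jv => d.modify jv.2 [] (· ++ [jv.1]))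
        PySem.Dict.empty with hcols
    -- membership in a cols entry: exactly the columns whose power reduces to t
    have hmem : ∀ (t : Int) (i : Nat), i < n →
        ((cols.getD t []).any (fun j => j.toNat == i) = true ↔ pwF i = t) := by
      intro t i hi
      rw [hcols, fm_cols_getD]
      simp only [List.any_map, List.any_filter, List.any_eq_true]
      constructor
      · rintro ⟨jv, hjv, hcond⟩
        rcases (PySem.List.mem_enumerate_iff _ _ _).1 hjv with ⟨k, hk, hkeq⟩
        subst hkeq
        simp only [Function.comp, Bool.and_eq_true, beq_iff_eq] at hcond
        simp only [hpwdef, List.getElem_map, List.getElem_range, List.length_map,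
          List.length_range] at hk hcond
        have : k = i := by omega
        subst this
        exact hcond.1
      · intro hteq
        refine ⟨((i:Int), pwF i), ?_, ?_⟩
        · rw [PySem.List.mem_enumerate_iff _ _ _]
          refine ⟨i, by simpa [hpwdef] using hi, ?_⟩
          simp [hpwdef]
        · simp [hteq]
    -- both matrices are maps over the rows; compare entrywise
    have hpwlen : pw.length = n := by simp [hpwdef]
    have hpwget : ∀ (k : Nat) (h : k < pw.length), pw[k] = pwF k := by
      intro k h
      simp [hpwdef]
    simp only [fm_ite_append, PySem.List.foldl_append_singleton_eq_map, List.nil_append]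
    apply List.ext_getElem
    · simp [hndef, hpwlen]
    · intro k hk1 hk2
      have hklt : k < n := by
        simp only [List.length_map, hpwlen] at hk2
        exact hk2
      simp only [List.getElem_map, PySem.List.getElem_pyRange_one, hpwget]
      apply List.ext_getElem
      · simp [fm_scat_len, PySem.List.length_pyRange_one]
      · intro j hj1 hj2
        have hjlt : j < n := by
          simpa [fm_scat2_len, fm_scat_len, List.length_replicate, hn] using hj2
        have hrep : j < (List.replicate d.toNat (0:Int)).length := by
          simp [List.length_replicate, ← hn]; exact hjlt
        rw [List.getElem_map,
          show ∀ (L : List Int) (h : j < L.length), L[j] = L.getD j 0 from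
            fun L h => (List.getD_eq_getElem L 0 h).symm,
          show ∀ (L : List Int) (h : j < L.length), L[j] = L.getD j 0 from
            fun L h => (List.getD_eq_getElem L 0 h).symm]
        refine Eq.trans ?_ (fm_scat2_get cols
          [PySem.Int.mod (1 - pwF k) p, PySem.Int.mod (pwF k - 1) p,
           PySem.Int.mod (-1 - pwF k) p, PySem.Int.mod (pwF k + 1) p]
          (List.replicate d.toNat (0:Int)) j hrep).symm
        simp only [zero_add, Int.toNat_natCast]
        have hgetDrep : (List.replicate d.toNat (0:Int)).getD j 0 = 0 := by
          simp only [List.getD, List.getElem?_replicate]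
          split <;> rfl
        rw [hgetDrep]
        -- reduce both sides' conditions to the same membership statement
        have hA := fm_cell_eq p ((2:Int) ^ k) ((2:Int) ^ j) hp
        have hmod : ∀ x : Int, PySem.Int.mod x p = x % p :=
          fun x => PySem.Int.mod_eq_emod_of_pos (by omega)
        have hpwFj : pwF j = (2:Int) ^ j % p := by simp [hpwF, hmod]
        have hjval : (PySem.List.pyRange 0 d).getD j 0 = (j:Int) := by
          rw [List.getD_eq_getElem _ _ (by simpa [hndef] using hjlt)]
          simp [PySem.List.getElem_pyRange_one]
        simp only [hmod, hpwF, hjval, Int.toNat_natCast]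
        have hBcond : ([(1 - (2:Int)^k % p) % p, ((2:Int)^k % p - 1) % p,
              (-1 - (2:Int)^k % p) % p, ((2:Int)^k % p + 1) % p].any
                (fun t => (cols.getD t []).any (fun j' => j'.toNat == j)) = true)
            ↔ ((2:Int)^j % p) ∈ [(1 - (2:Int)^k % p) % p, ((2:Int)^k % p - 1) % p,
                (-1 - (2:Int)^k % p) % p, ((2:Int)^k % p + 1) % p] := by
          rw [List.any_eq_true]
          constructor
          · rintro ⟨t, ht, hcond⟩
            have hpj := (hmem t j hjlt).1 hcond
            rw [← hpj, hpwFj] at ht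
            exact ht
          · intro hmemB
            exact ⟨pwF j, by rw [hpwFj]; exact hmemB, (hmem (pwF j) j hjlt).2 rfl⟩
        exact if_congr (hA.trans hBcond.symm) rfl rfl
        all_goals first | exact hj2 | simpa [hndef] using hjlt

-- ===== VERDICT (by name: the statement is the Claim_ definition above) =====
theorem find_matrix_in_basis_spec : Claim_equal_find_matrix_in_basis := by
  intro d _
  unfold Spec_find_matrix_in_basis
  exact fm_main d
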